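-- pv_equiv track=rewrite | github.com/ipython/ipykernel | ipykernel/compiler.py | murmur2_x86
-- ===== SOURCE A (Python) =====
-- def murmur2_x86(data, seed):
--     m = 0x5bd1e995
--     data = [chr(d) for d in str.encode(data, "utf8")]
--     length = len(data)
--     h = seed ^ length
--     rounded_end = (length & 0xfffffffc)
--     for i in range(0, rounded_end, 4):
--         k = (ord(data[i]) & 0xff) | ((ord(data[i + 1]) & 0xff) << 8) | \
--            ((ord(data[i + 2]) & 0xff) << 16) | (ord(data[i + 3]) << 24)
--         k = (k * m) & 0xffffffff
--         k ^= k >> 24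
--         k = (k * m) & 0xffffffff
--
--         h = (h * m) & 0xffffffff
--         h ^= k
--
--     val = length & 0x03
--     k = 0
--     if val == 3:
--         k = (ord(data[rounded_end + 2]) & 0xff) << 16
--     if val in [2, 3]:
--         k |= (ord(data[rounded_end + 1]) & 0xff) << 8
--     if val in [1, 2, 3]:
--         k |= ord(data[rounded_end]) & 0xff
--         h ^= k
--         h = (h * m) & 0xffffffff
--
--     h ^= h >> 13
--     h = (h * m) & 0xffffffff
--     h ^= h >> 15
--
--     return h
-- ===== SOURCE B (Python) =====
-- def murmur2_x86(data, seed):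
--     m = 0x5bd1e995
--     mask = 0xffffffff
--     b = str.encode(data, "utf8")
--     h = seed ^ len(b)
--     k = 0
--     for pos, byte in enumerate(b):
--         k |= (byte & 0xff) << (8 * (pos % 4))
--         if pos % 4 == 3:
--             k = (k * m) & mask
--             k ^= k >> 24
--             k = (k * m) & mask
--             h = (h * m) & mask
--             h ^= k
--             k = 0
--     if len(b) % 4:
--         h ^= k
--         h = (h * m) & mask
--     h ^= h >> 13
--     h = (h * m) & mask
--     h ^= h >> 15
--     return h
-- ===== Notes on version B (the rewrite author's own statement) =====
-- stated objective: simpler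
-- what changed: B replaces A's stride-4 indexed loop plus separate three-branch tail block with a single linear pass over the utf-8 bytes that keeps a word accumulator and mixes whenever a 4-byte word completes, handling the tail with one final conditional mix.
import Mathlib
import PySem

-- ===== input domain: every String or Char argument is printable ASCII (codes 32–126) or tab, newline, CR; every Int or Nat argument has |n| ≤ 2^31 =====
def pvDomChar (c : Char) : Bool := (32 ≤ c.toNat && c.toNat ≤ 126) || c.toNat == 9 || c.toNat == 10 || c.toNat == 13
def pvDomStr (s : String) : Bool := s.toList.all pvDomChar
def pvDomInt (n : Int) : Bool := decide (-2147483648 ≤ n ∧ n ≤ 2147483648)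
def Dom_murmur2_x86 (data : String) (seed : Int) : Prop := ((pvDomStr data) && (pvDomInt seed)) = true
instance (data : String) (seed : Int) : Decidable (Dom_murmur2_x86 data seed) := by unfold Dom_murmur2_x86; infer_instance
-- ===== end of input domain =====

-- B makes one linear pass over the utf-8 bytes with a word accumulator instead of A's
-- stride-4 indexed loop plus a separate three-branch tail block (objective: simpler).

-- ===== PORT A =====
-- On the ASCII domain the utf-8 bytes of `data` are exactly the character codes.
def pvBytes (data : String) : List Int := data.toList.map (fun c => (c.toNat : Int))

-- xs[i]; every index A uses is in range, so the default is never returned.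
def pvByteAt (l : List Int) (i : Int) : Int := (PySem.List.pyGet? l i).getD 0

-- `for i in range(0, rounded_end, 4)` as recursion on the loop counter
def pvALoop (l : List Int) (re : Int) (i : Int) (h : Int) : Int :=
  if _h : i < re then
    let k0 := PySem.Int.bor (PySem.Int.bor (PySem.Int.bor
        (PySem.Int.band (pvByteAt l i) 0xff)
        ((PySem.Int.band (pvByteAt l (i + 1)) 0xff) <<< (8 : Nat)))
        ((PySem.Int.band (pvByteAt l (i + 2)) 0xff) <<< (16 : Nat)))
        ((pvByteAt l (i + 3)) <<< (24 : Nat))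
    let k1 := PySem.Int.band (k0 * 0x5bd1e995) 0xffffffff
    let k2 := PySem.Int.bxor k1 (k1 >>> (24 : Nat))
    let k3 := PySem.Int.band (k2 * 0x5bd1e995) 0xffffffff
    let h1 := PySem.Int.band (h * 0x5bd1e995) 0xffffffff
    pvALoop l re (i + 4) (PySem.Int.bxor h1 k3)
  else h
termination_by (re - i).toNat
decreasing_by omega

def murmur2_x86 (data : String) (seed : Int) : Int :=
  let l := pvBytes data
  let length : Int := l.length
  let h0 := PySem.Int.bxor seed length
  let re := PySem.Int.band length 0xfffffffc
  let h1 := pvALoop l re 0 h0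
  let val := PySem.Int.band length 0x03
  let k1 : Int := if val == 3 then (PySem.Int.band (pvByteAt l (re + 2)) 0xff) <<< (16 : Nat) else 0
  let k2 : Int := if val == 2 || val == 3 then PySem.Int.bor k1 ((PySem.Int.band (pvByteAt l (re + 1)) 0xff) <<< (8 : Nat)) else k1
  let h2 : Int := if val == 1 || val == 2 || val == 3 then
      PySem.Int.band ((PySem.Int.bxor h1 (PySem.Int.bor k2 (PySem.Int.band (pvByteAt l re) 0xff))) * 0x5bd1e995) 0xffffffff
    else h1
  let h3 := PySem.Int.bxor h2 (h2 >>> (13 : Nat))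
  let h4 := PySem.Int.band (h3 * 0x5bd1e995) 0xffffffff
  PySem.Int.bxor h4 (h4 >>> (15 : Nat))

-- ===== PORT B =====
-- `for pos, byte in enumerate(b)` as recursion on the byte list, carrying (pos, h, k)
def pvBLoop (l : List Int) (pos : Int) (h : Int) (k : Int) : Int × Int :=
  match l with
  | [] => (h, k)
  | byte :: rest =>
    let k' := PySem.Int.bor k ((PySem.Int.band byte 0xff) <<< (8 * (PySem.Int.mod pos 4)).toNat)
    if PySem.Int.mod pos 4 == 3 then
      let k1 := PySem.Int.band (k' * 0x5bd1e995) 0xffffffff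
      let k2 := PySem.Int.bxor k1 (k1 >>> (24 : Nat))
      let k3 := PySem.Int.band (k2 * 0x5bd1e995) 0xffffffff
      let h1 := PySem.Int.band (h * 0x5bd1e995) 0xffffffff
      pvBLoop rest (pos + 1) (PySem.Int.bxor h1 k3) 0
    else
      pvBLoop rest (pos + 1) h k'

def murmur2_x86_alt (data : String) (seed : Int) : Int :=
  let l := pvBytes data
  let len : Int := l.length
  let hk := pvBLoop l 0 (PySem.Int.bxor seed len) 0
  let h2 : Int := if PySem.Int.mod len 4 != 0 then
      PySem.Int.band ((PySem.Int.bxor hk.1 hk.2) * 0x5bd1e995) 0xffffffff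
    else hk.1
  let h3 := PySem.Int.bxor h2 (h2 >>> (13 : Nat))
  let h4 := PySem.Int.band (h3 * 0x5bd1e995) 0xffffffff
  PySem.Int.bxor h4 (h4 >>> (15 : Nat))

-- ===== PRECONDITION & SPEC =====
-- Pre_ excludes data of 2^32 or more utf-8 bytes: there A's `length & 0xfffffffc` is no longer
-- the length rounded down to a multiple of 4, so A silently skips whole 4-byte words past the
-- 4 GiB boundary (and is infeasible to run); B hashes every byte.
def Pre_murmur2_x86 (data : String) (seed : Int) : Prop := data.toList.length < 4294967296
instance (data : String) (seed : Int) : Decidable (Pre_murmur2_x86 data seed) := by unfold Pre_murmur2_x86; infer_instance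
def pvWitness_murmur2_x86 : String × Int := ("murmur", 33)

def Spec_murmur2_x86 (data : String) (seed : Int) (out : Int) : Prop := out = murmur2_x86_alt data seed
instance (data : String) (seed : Int) (out : Int) : Decidable (Spec_murmur2_x86 data seed out) := by unfold Spec_murmur2_x86; infer_instance

-- ===== CLAIM (what is proved, stated in full; the proofs are below) =====
def Claim_equal_murmur2_x86 : Prop := ∀ (data : String) (seed : Int), Dom_murmur2_x86 data seed → Pre_murmur2_x86 data seed → Spec_murmur2_x86 data seed (murmur2_x86 data seed)

-- ===== LEMMAS AND PROOFS =====

-- the common word-mix step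
def pvMix (h w : Int) : Int :=
  let k1 := PySem.Int.band (w * 0x5bd1e995) 0xffffffff
  let k2 := PySem.Int.bxor k1 (k1 >>> (24 : Nat))
  let k3 := PySem.Int.band (k2 * 0x5bd1e995) 0xffffffff
  PySem.Int.bxor (PySem.Int.band (h * 0x5bd1e995) 0xffffffff) k3

def pvWord (a b c d : Int) : Int :=
  PySem.Int.bor (PySem.Int.bor (PySem.Int.bor
    (PySem.Int.band a 0xff) ((PySem.Int.band b 0xff) <<< (8 : Nat)))
    ((PySem.Int.band c 0xff) <<< (16 : Nat))) (d <<< (24 : Nat))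

-- common reference: mix full words, return remaining tail (< 4 bytes)
def pvRef (s : List Int) (h : Int) : Int × List Int :=
  match s with
  | a :: b :: c :: d :: t => pvRef t (pvMix h (pvWord a b c d))
  | t => (h, t)

lemma pv_and_mask (n : Nat) (hn : n < 2 ^ 32) : n &&& 0xfffffffc = n - n % 4 := by
  have h1 : n - n % 4 = (n / 4) <<< 2 := by
    rw [Nat.shiftLeft_eq]; omega
  rw [h1]
  apply Nat.eq_of_testBit_eq
  intro i
  rw [Nat.testBit_and, show (0xfffffffc : Nat) = (2 ^ 30 - 1) <<< 2 from rfl,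
    Nat.testBit_shiftLeft, Nat.testBit_shiftLeft,
    show n / 4 = n >>> 2 from (Nat.shiftRight_eq_div_pow n 2).symm,
    Nat.testBit_shiftRight, Nat.testBit_two_pow_sub_one]
  by_cases h2 : 2 <= i
  . by_cases h30 : i - 2 < 30
    . simp [h2, h30, show 2 + (i - 2) = i by omega]
    . have : n.testBit i = false := Nat.testBit_lt_two_pow (by
        calc n < 2 ^ 32 := hn
        _ <= 2 ^ i := Nat.pow_le_pow_right (by omega) (by omega))
      simp [h2, h30, show 2 + (i - 2) = i by omega, this]
  . simp [h2]

lemma pv_band255 (x : Int) (h0 : 0 <= x) (h1 : x < 256) : PySem.Int.band x 0xff = x := by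
  rw [PySem.Int.band_of_nonneg h0 (by norm_num : (0 : Int) <= 0xff)]
  have h2 : (0xff : Int).toNat = 255 := rfl
  rw [h2, show (255 : Nat) = 2 ^ 8 - 1 from rfl, Nat.and_two_pow_sub_one_eq_mod,
    Nat.mod_eq_of_lt (by omega)]
  omega

lemma pv_byteAt_append (p : List Int) (x : Int) (s : List Int) (j : Nat) :
    pvByteAt (p ++ x :: s) ((p.length : Int) + (j : Int)) = (x :: s).getD j 0 := by
  unfold pvByteAt
  rw [show ((p.length : Int) + (j : Int)) = ((p.length + j : Nat) : Int) by omega,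
    PySem.List.pyGet?_natCast]
  simp [List.getElem?_append_right]

-- A's loop equals the reference fold over the uneaten suffix
lemma pv_aLoop_eq (s p : List Int) (h : Int) (hp : p.length % 4 = 0) :
    pvALoop (p ++ s) (((p ++ s).length - (p ++ s).length % 4 : Nat) : Int) (p.length : Int) h
      = (pvRef s h).1 := by
  induction s, h using pvRef.induct generalizing p with
  | case1 h a b c d t ih =>
    have hlt : (p.length : Int) < (((p ++ (a :: b :: c :: d :: t)).length - (p ++ (a :: b :: c :: d :: t)).length % 4 : Nat) : Int) := by
      simp only [List.length_append, List.length_cons]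
      have : (p.length + (t.length + 1 + 1 + 1 + 1)) % 4 = t.length % 4 := by omega
      push_cast
      omega
    rw [pvALoop, dif_pos hlt]
    have hb0 : pvByteAt (p ++ a :: b :: c :: d :: t) (p.length : Int) = a := by
      simpa using pv_byteAt_append p a (b :: c :: d :: t) 0
    have hb1 : pvByteAt (p ++ a :: b :: c :: d :: t) ((p.length : Int) + 1) = b := by
      simpa using pv_byteAt_append p a (b :: c :: d :: t) 1
    have hb2 : pvByteAt (p ++ a :: b :: c :: d :: t) ((p.length : Int) + 2) = c := by
      simpa using pv_byteAt_append p a (b :: c :: d :: t) 2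
    have hb3 : pvByteAt (p ++ a :: b :: c :: d :: t) ((p.length : Int) + 3) = d := by
      simpa using pv_byteAt_append p a (b :: c :: d :: t) 3
    rw [hb0, hb1, hb2, hb3]
    have hih := ih (p ++ [a, b, c, d]) (by simp; omega)
    simp only [List.append_assoc, List.cons_append, List.nil_append] at hih
    rw [show ((p.length : Int) + 4) = (((p ++ [a, b, c, d]).length : Nat) : Int) by
      simp [List.length_append]]
    simp only [List.append_assoc, List.cons_append, List.nil_append]
    rw [pvRef, <- hih]
    rfl
  | case2 h t hne =>
    have ht : t.length < 4 := by
      match t, hne with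
      | [], _ => simp
      | [_], _ => simp
      | [_, _], _ => simp
      | [_, _, _], _ => simp
      | a :: b :: c :: d :: r, hne => exact absurd rfl (hne a b c d r)
    have hre : ((p ++ t).length - (p ++ t).length % 4 : Nat) = p.length := by
      simp only [List.length_append]; omega
    rw [pvALoop, hre, dif_neg (by omega)]
    rw [pvRef.eq_def]
    match t, hne with
    | [], _ => rfl
    | [_], _ => rfl
    | [_, _], _ => rfl
    | [_, _, _], _ => rfl
    | a :: b :: c :: d :: r, hne => exact absurd rfl (hne a b c d r)

-- the tail accumulator B builds over a suffix of fewer than 4 bytes (normal form)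
def pvKtail (t : List Int) : Int :=
  match t with
  | [] => 0
  | [a] => PySem.Int.band a 0xff
  | [a, b] => PySem.Int.bor (PySem.Int.band a 0xff) ((PySem.Int.band b 0xff) <<< (8 : Nat))
  | a :: b :: c :: _ => PySem.Int.bor (PySem.Int.bor (PySem.Int.band a 0xff) ((PySem.Int.band b 0xff) <<< (8 : Nat))) ((PySem.Int.band c 0xff) <<< (16 : Nat))

-- B's loop equals the reference fold, leaving the tail accumulator
lemma pv_zero_bor (x : Int) : PySem.Int.bor 0 x = x := by
  rw [PySem.Int.bor_comm, PySem.Int.bor_zero]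

lemma pv_toNat8 : (8 : Int).toNat = 8 := rfl
lemma pv_toNat16 : (16 : Int).toNat = 16 := rfl
lemma pv_toNat24 : (24 : Int).toNat = 24 := rfl

lemma pv_bLoop_eq (s : List Int) (p : Int) (h : Int)
    (hb : forall x, x ∈ s -> 0 <= x ∧ x < 256) (hp : PySem.Int.mod p 4 = 0) :
    pvBLoop s p h 0 = ((pvRef s h).1, pvKtail (pvRef s h).2) := by
  induction s, h using pvRef.induct generalizing p with
  | case1 h a b c d t ih =>
    have hp' : p % 4 = 0 := by
      rw [PySem.Int.mod_eq_emod_of_pos (by norm_num)] at hp; exact hp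
    have hm1 : PySem.Int.mod (p + 1) 4 = 1 := by
      rw [PySem.Int.mod_eq_emod_of_pos (by norm_num)]; omega
    have hm2 : PySem.Int.mod (p + 1 + 1) 4 = 2 := by
      rw [PySem.Int.mod_eq_emod_of_pos (by norm_num)]; omega
    have hm3 : PySem.Int.mod (p + 1 + 1 + 1) 4 = 3 := by
      rw [PySem.Int.mod_eq_emod_of_pos (by norm_num)]; omega
    have hd : 0 <= d ∧ d < 256 := hb d (by simp)
    simp only [pvBLoop, hp, hm1, hm2, hm3]
    norm_num [pv_zero_bor, pv_toNat8, pv_toNat16, pv_toNat24]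
    rw [pv_band255 d hd.1 hd.2]
    rw [show (p + 1 + 1 + 1 + 1 : Int) = p + 4 by ring]
    rw [pvRef]
    exact ih (p + 4)
      (fun x hx => hb x (List.mem_cons_of_mem _ (List.mem_cons_of_mem _
        (List.mem_cons_of_mem _ (List.mem_cons_of_mem _ hx)))))
      (by rw [PySem.Int.mod_eq_emod_of_pos (by norm_num)]; omega)
  | case2 h t hne =>
    have hm1 : PySem.Int.mod (p + 1) 4 = 1 := by
      rw [PySem.Int.mod_eq_emod_of_pos (by norm_num)] at hp ⊢; omega
    have hm2 : PySem.Int.mod (p + 1 + 1) 4 = 2 := by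
      rw [PySem.Int.mod_eq_emod_of_pos (by norm_num)] at hp ⊢; omega
    match t, hne with
    | [], _ => rfl
    | [a], _ =>
      simp only [pvBLoop, hp]
      norm_num [pvRef, pvKtail, pv_zero_bor, pv_toNat8, pv_toNat16, pv_toNat24]
    | [a, b], _ =>
      simp only [pvBLoop, hp, hm1]
      norm_num [pvRef, pvKtail, pv_zero_bor, pv_toNat8, pv_toNat16, pv_toNat24]
    | [a, b, c], _ =>
      simp only [pvBLoop, hp, hm1, hm2]
      norm_num [pvRef, pvKtail, pv_zero_bor, pv_toNat8, pv_toNat16, pv_toNat24]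
    | a :: b :: c :: d :: r, hne => exact absurd rfl (hne a b c d r)

-- pvRef's suffix: the input splits as mixed words ++ tail, tail shorter than 4
lemma pv_ref_split (s : List Int) (h : Int) :
    ∃ p, s = p ++ (pvRef s h).2 ∧ p.length % 4 = 0 ∧ (pvRef s h).2.length = s.length % 4 := by
  induction s, h using pvRef.induct with
  | case1 h a b c d t ih =>
    obtain ⟨p, hp1, hp2, hp3⟩ := ih
    refine ⟨a :: b :: c :: d :: p, ?_, by simp; omega, ?_⟩
    . rw [pvRef, List.cons_append, List.cons_append, List.cons_append, List.cons_append, <- hp1]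
    . rw [pvRef]
      simp only [List.length_cons]
      omega
  | case2 h t hne =>
    refine ⟨[], ?_, by simp, ?_⟩ <;>
    . rw [pvRef.eq_def]
      match t, hne with
      | [], _ => simp
      | [_], _ => simp
      | [_, _], _ => simp
      | [_, _, _], _ => simp
      | a :: b :: c :: d :: r, hne => exact absurd rfl (hne a b c d r)

lemma pv_shl_nonneg (x : Int) (n : Nat) (hx : 0 <= x) : 0 <= x <<< n := by
  rw [Int.shiftLeft_eq]
  positivity

lemma pv_bor_rot (x y z : Int) (hx : 0 <= x) (hy : 0 <= y) (hz : 0 <= z) :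
    PySem.Int.bor (PySem.Int.bor z y) x = PySem.Int.bor (PySem.Int.bor x y) z := by
  have hswap : ∀ a b c : Nat, (a ||| b) ||| c = (c ||| b) ||| a := by
    intro a b c
    rw [Nat.lor_assoc, Nat.lor_comm a (b ||| c), Nat.lor_comm b c]
  rw [PySem.Int.bor_of_nonneg hz hy, PySem.Int.bor_of_nonneg hx hy,
    PySem.Int.bor_of_nonneg (by positivity) hx, PySem.Int.bor_of_nonneg (by positivity) hz]
  simp only [Int.toNat_natCast]
  rw [hswap]

theorem murmur2_x86_spec : Claim_equal_murmur2_x86 := by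
  intro data seed hdom hpre
  unfold Spec_murmur2_x86
  have hb : ∀ x ∈ pvBytes data, 0 <= x ∧ x < 256 := by
    intro x hx
    simp only [pvBytes, List.mem_map] at hx
    obtain ⟨c, hc, rfl⟩ := hx
    have hdc : pvDomChar c = true := by
      have h1 : pvDomStr data = true := by
        unfold Dom_murmur2_x86 at hdom
        simp only [Bool.and_eq_true] at hdom
        exact hdom.1
      exact List.all_eq_true.mp h1 c hc
    simp only [pvDomChar, Bool.or_eq_true, Bool.and_eq_true, decide_eq_true_eq, beq_iff_eq] at hdc
    have hcn : c.toNat < 256 := by omega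
    exact ⟨by positivity, by exact_mod_cast hcn⟩
  have hlen : (pvBytes data).length < 2 ^ 32 := by
    have : (pvBytes data).length = data.toList.length := by simp [pvBytes]
    unfold Pre_murmur2_x86 at hpre
    omega
  simp only [murmur2_x86, murmur2_x86_alt]
  set l := pvBytes data with hl
  set n := l.length with hn
  have hre : PySem.Int.band (n : Int) 0xfffffffc = ((n - n % 4 : Nat) : Int) := by
    rw [show (0xfffffffc : Int) = ((0xfffffffc : Nat) : Int) from rfl,
      PySem.Int.band_natCast, pv_and_mask n hlen]
  have hval : PySem.Int.band (n : Int) 0x03 = ((n % 4 : Nat) : Int) := by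
    rw [show (0x03 : Int) = ((3 : Nat) : Int) from rfl, PySem.Int.band_natCast,
      show (3 : Nat) = 2 ^ 2 - 1 from rfl, Nat.and_two_pow_sub_one_eq_mod]
  have hmod : PySem.Int.mod (n : Int) 4 = ((n % 4 : Nat) : Int) := by
    rw [show (4 : Int) = ((4 : Nat) : Int) from rfl, PySem.Int.mod_natCast]
  rw [hre, hval, hmod]
  have hA := pv_aLoop_eq l [] (PySem.Int.bxor seed (n : Int)) (by simp)
  simp only [List.nil_append, List.length_nil, Nat.cast_zero] at hA
  rw [hA]
  have hB := pv_bLoop_eq l 0 (PySem.Int.bxor seed (n : Int)) hb (by rfl)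
  rw [hB]
  obtain ⟨pfx, hsp, hp4, hlen4⟩ := pv_ref_split l (PySem.Int.bxor seed (n : Int))
  have hmod4 : n % 4 < 4 := by omega
  generalize hg : (pvRef l (PySem.Int.bxor seed (n : Int))).2 = tl at hsp hlen4 ⊢
  have hpfx : ((n - n % 4 : Nat) : Int) = (pfx.length : Int) := by
    have h2 := congrArg List.length hsp
    simp only [List.length_append] at h2
    omega
  rcases tl with _ | ⟨a, _ | ⟨b, _ | ⟨c, _ | ⟨d, r⟩⟩⟩⟩
  . -- n % 4 = 0
    have h0 : n % 4 = 0 := by simpa using hlen4.symm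
    simp [h0]
  . -- n % 4 = 1
    have h1 : n % 4 = 1 := by simpa using hlen4.symm
    have ha := hb a (by rw [hsp]; simp)
    have hb0 : pvByteAt l (pfx.length : Int) = a := by
      rw [hsp]; simpa using pv_byteAt_append pfx a [] 0
    rw [hpfx, hb0]
    simp [h1, pvKtail, pv_zero_bor]
  . -- n % 4 = 2
    have h2 : n % 4 = 2 := by simpa using hlen4.symm
    have hb0 : pvByteAt l (pfx.length : Int) = a := by
      rw [hsp]; simpa using pv_byteAt_append pfx a [b] 0
    have hb1 : pvByteAt l ((pfx.length : Int) + 1) = b := by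
      rw [hsp]; simpa using pv_byteAt_append pfx a [b] 1
    rw [hpfx, hb0, hb1]
    simp only [h2, pvKtail]
    norm_num [pv_zero_bor]
    rw [PySem.Int.bor_comm (PySem.Int.band b 255 <<< (8 : Nat)) (PySem.Int.band a 255)]
  . -- n % 4 = 3
    have h3 : n % 4 = 3 := by simpa using hlen4.symm
    have ha := hb a (by rw [hsp]; simp)
    have hbb := hb b (by rw [hsp]; simp)
    have hcc := hb c (by rw [hsp]; simp)
    have hb0 : pvByteAt l (pfx.length : Int) = a := by
      rw [hsp]; simpa using pv_byteAt_append pfx a [b, c] 0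
    have hb1 : pvByteAt l ((pfx.length : Int) + 1) = b := by
      rw [hsp]; simpa using pv_byteAt_append pfx a [b, c] 1
    have hb2 : pvByteAt l ((pfx.length : Int) + 2) = c := by
      rw [hsp]; simpa using pv_byteAt_append pfx a [b, c] 2
    rw [hpfx, hb0, hb1, hb2]
    simp only [h3, pvKtail]
    norm_num
    rw [pv_bor_rot (PySem.Int.band a 255) (PySem.Int.band b 255 <<< (8 : Nat))
      (PySem.Int.band c 255 <<< (16 : Nat))
      (PySem.Int.band_nonneg_of_nonneg_left _ ha.1)
      (pv_shl_nonneg _ _ (PySem.Int.band_nonneg_of_nonneg_left _ hbb.1))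
      (pv_shl_nonneg _ _ (PySem.Int.band_nonneg_of_nonneg_left _ hcc.1))]
  . -- impossible: tail shorter than 4
    exfalso
    have := hlen4
    simp only [List.length_cons] at this
    omega
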